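-- pv_equiv track=rewrite | github.com/ricky-aufvaa/GraphRAG | src/community_detection/community_detection.py | generate_community_theme
-- ===== SOURCE A (Python) =====
-- from collections import defaultdict, Counter
--
-- def generate_community_theme(entity_names, entities):
--     """Generate a descriptive theme for the community"""
--
--     # Count entity types
--     type_counts = defaultdict(int)
--     for entity_name in entity_names:
--         entity_type = entities.get(entity_name, {}).get('type', 'UNKNOWN')
--         type_counts[entity_type] += 1
--
--     # Generate theme based on most common types and entities
--     if type_counts['CONDITION'] > 0:
--         conditions = [name for name in entity_names
--                      if entities.get(name, {}).get('type') == 'CONDITION']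
--         if any('heart' in name or 'cardiac' in name or 'aortic' in name
--                for name in conditions):
--             return "Cardiovascular conditions and treatments"
--         elif any('liver' in name or 'hepatic' in name or 'cirrhosis' in name
--                  for name in conditions):
--             return "Liver diseases and complications"
--         elif any('hip' in name or 'knee' in name or 'bone' in name
--                  for name in conditions):
--             return "Orthopedic conditions and procedures"
--         elif any('blood' in name or 'anemia' in name or 'hemoglobin' in name
--                  for name in conditions):
--             return "Hematological conditions and blood disorders"
--         else:
--             return f"Medical conditions ({len(conditions)} conditions)"
--
--     elif type_counts['MEDICATION'] > 0:
--         return f"Medications and treatments ({type_counts['MEDICATION']} medications)"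
--
--     elif type_counts['ANATOMY'] > 0:
--         return f"Anatomical structures ({type_counts['ANATOMY']} structures)"
--
--     elif type_counts['LAB_VALUE'] > 0:
--         return f"Laboratory values and tests ({type_counts['LAB_VALUE']} lab values)"
--
--     elif type_counts['PROCEDURE'] > 0:
--         return f"Medical procedures ({type_counts['PROCEDURE']} procedures)"
--
--     else:
--         return f"Mixed medical entities ({len(entity_names)} entities)"
-- ===== SOURCE B (Python) =====
-- _KEYWORDS = (("heart", "cardiac", "aortic"),
--              ("liver", "hepatic", "cirrhosis"),
--              ("hip", "knee", "bone"),
--              ("blood", "anemia", "hemoglobin"))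
-- _TYPE_RANK = {"CONDITION": 4, "MEDICATION": 5, "ANATOMY": 6,
--               "LAB_VALUE": 7, "PROCEDURE": 8}
-- _THEMES = ("Cardiovascular conditions and treatments",
--            "Liver diseases and complications",
--            "Orthopedic conditions and procedures",
--            "Hematological conditions and blood disorders")
-- _FORMATS = (("Medications and treatments (", " medications)"),
--             ("Anatomical structures (", " structures)"),
--             ("Laboratory values and tests (", " lab values)"),
--             ("Medical procedures (", " procedures)"))
--
--
-- def _rank(name, t):
--     """Priority rank of one entity: 0-3 condition keyword themes, 4 plain
--     condition, 5-8 the other known types in chain order, 9 anything else."""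
--     r = _TYPE_RANK.get(t, 9)
--     if r == 4:
--         for i, kws in enumerate(_KEYWORDS):
--             if any(k in name for k in kws):
--                 return i
--     return r
--
--
-- def generate_community_theme(entity_names, entities):
--     """Generate a descriptive theme for the community"""
--     best = 9
--     counts = [0, 0, 0, 0, 0]
--     for name in entity_names:
--         t = entities.get(name, {}).get('type', 'UNKNOWN')
--         r = _rank(name, t)
--         if r <= 4:
--             counts[0] += 1
--         elif r <= 8:
--             counts[r - 4] += 1
--         if r < best:
--             best = r
--     if best < 4:
--         return _THEMES[best]
--     if best == 4:
--         return "Medical conditions (%d conditions)" % counts[0]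
--     if best <= 8:
--         pre, suf = _FORMATS[best - 5]
--         return pre + str(counts[best - 4]) + suf
--     return "Mixed medical entities (%d entities)" % len(entity_names)
-- ===== Notes on version B (the rewrite author's own statement) =====
-- stated objective: alternative
-- what changed: Replaces A's count-dict plus elif cascades (with a second filtering pass over the names) by a single pass that assigns every entity a numeric priority rank (0-3 keyword condition themes, 4 plain condition, 5-8 the other types, 9 unknown), keeps the running minimum rank and five tallies, and maps the minimum rank to the output message.
import Mathlib
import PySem

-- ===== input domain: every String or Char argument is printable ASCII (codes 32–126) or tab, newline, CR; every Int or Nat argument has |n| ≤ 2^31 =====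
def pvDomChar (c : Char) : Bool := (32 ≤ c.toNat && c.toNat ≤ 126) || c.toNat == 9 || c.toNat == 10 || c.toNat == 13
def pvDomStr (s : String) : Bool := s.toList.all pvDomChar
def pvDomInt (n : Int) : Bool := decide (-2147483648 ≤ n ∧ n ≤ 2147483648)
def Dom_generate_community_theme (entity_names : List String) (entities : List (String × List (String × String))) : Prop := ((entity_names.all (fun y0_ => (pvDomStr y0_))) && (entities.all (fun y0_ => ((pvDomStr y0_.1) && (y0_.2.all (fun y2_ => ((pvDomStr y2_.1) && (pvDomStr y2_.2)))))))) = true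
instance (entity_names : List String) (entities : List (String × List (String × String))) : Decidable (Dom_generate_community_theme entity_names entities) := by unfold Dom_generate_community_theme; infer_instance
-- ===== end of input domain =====

-- B replaces A's two-pass count-then-cascade logic with a single-pass minimum-priority
-- ranking of the entities; objective: alternative decomposition, same asymptotic cost.

-- shared one-line accessor: entities.get(name, {}).get('type', 'UNKNOWN')
def pvTypeOf (entities : List (String × List (String × String))) (name : String) : String :=
  (PySem.Dict.mk ((PySem.Dict.mk entities).getD name [])).getD "type" "UNKNOWN"

-- ===== PORT A =====
def generate_community_theme (entity_names : List String) (entities : List (String × List (String × String))) : String :=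
  -- type_counts = defaultdict(int); for entity_name in entity_names: type_counts[t] += 1
  let type_counts : PySem.Dict String Int :=
    entity_names.foldl (fun d n =>
      let entity_type := pvTypeOf entities n
      d.insert entity_type (d.getD entity_type 0 + 1)) PySem.Dict.empty
  if type_counts.getD "CONDITION" 0 > 0 then
    let conditions := entity_names.filter (fun name =>
      (PySem.Dict.mk ((PySem.Dict.mk entities).getD name [])).get? "type" == some "CONDITION")
    if conditions.any (fun name => PySem.Str.isIn "heart" name || PySem.Str.isIn "cardiac" name || PySem.Str.isIn "aortic" name) then
      "Cardiovascular conditions and treatments"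
    else if conditions.any (fun name => PySem.Str.isIn "liver" name || PySem.Str.isIn "hepatic" name || PySem.Str.isIn "cirrhosis" name) then
      "Liver diseases and complications"
    else if conditions.any (fun name => PySem.Str.isIn "hip" name || PySem.Str.isIn "knee" name || PySem.Str.isIn "bone" name) then
      "Orthopedic conditions and procedures"
    else if conditions.any (fun name => PySem.Str.isIn "blood" name || PySem.Str.isIn "anemia" name || PySem.Str.isIn "hemoglobin" name) then
      "Hematological conditions and blood disorders"
    else
      "Medical conditions (" ++ PySem.Int.toStr (conditions.length : Int) ++ " conditions)"
  else if type_counts.getD "MEDICATION" 0 > 0 then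
    "Medications and treatments (" ++ PySem.Int.toStr (type_counts.getD "MEDICATION" 0) ++ " medications)"
  else if type_counts.getD "ANATOMY" 0 > 0 then
    "Anatomical structures (" ++ PySem.Int.toStr (type_counts.getD "ANATOMY" 0) ++ " structures)"
  else if type_counts.getD "LAB_VALUE" 0 > 0 then
    "Laboratory values and tests (" ++ PySem.Int.toStr (type_counts.getD "LAB_VALUE" 0) ++ " lab values)"
  else if type_counts.getD "PROCEDURE" 0 > 0 then
    "Medical procedures (" ++ PySem.Int.toStr (type_counts.getD "PROCEDURE" 0) ++ " procedures)"
  else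
    "Mixed medical entities (" ++ PySem.Int.toStr (entity_names.length : Int) ++ " entities)"

-- ===== PORT B =====
-- _KEYWORDS
def pvKeywords : List (List String) :=
  [["heart", "cardiac", "aortic"],
   ["liver", "hepatic", "cirrhosis"],
   ["hip", "knee", "bone"],
   ["blood", "anemia", "hemoglobin"]]

-- the 'for i, kws in enumerate(_KEYWORDS): if any(...): return i' loop; falls through to 4
def pvKwScan (name : String) : List (List String) → Nat → Nat
  | [], _ => 4
  | kws :: rest, i =>
    if kws.any (fun k => PySem.Str.isIn k name) then i else pvKwScan name rest (i + 1)

-- _rank(name, t)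
def pvRank (name t : String) : Nat :=
  let r := (PySem.Dict.mk [("CONDITION", (4 : Nat)), ("MEDICATION", 5), ("ANATOMY", 6),
                           ("LAB_VALUE", 7), ("PROCEDURE", 8)]).getD t 9
  if r = 4 then pvKwScan name pvKeywords 0 else r

-- one iteration of B's loop body over the state (best, counts)
def pvStep (entities : List (String × List (String × String)))
    (st : Nat × List Int) (name : String) : Nat × List Int :=
  let t := pvTypeOf entities name
  let r := pvRank name t
  let counts :=
    if r ≤ 4 then st.2.set 0 (st.2.getD 0 0 + 1)
    else if r ≤ 8 then st.2.set (r - 4) (st.2.getD (r - 4) 0 + 1)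
    else st.2
  (if r < st.1 then r else st.1, counts)

def generate_community_theme_alt (entity_names : List String) (entities : List (String × List (String × String))) : String :=
  let res := entity_names.foldl (pvStep entities) (9, [0, 0, 0, 0, 0])
  let best := res.1
  let counts := res.2
  if best < 4 then
    ["Cardiovascular conditions and treatments",
     "Liver diseases and complications",
     "Orthopedic conditions and procedures",
     "Hematological conditions and blood disorders"].getD best ""
  else if best = 4 then
    "Medical conditions (" ++ PySem.Int.toStr (counts.getD 0 0) ++ " conditions)"
  else if best ≤ 8 then
    let fmt := [("Medications and treatments (", " medications)"),
                ("Anatomical structures (", " structures)"),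
                ("Laboratory values and tests (", " lab values)"),
                ("Medical procedures (", " procedures)")].getD (best - 5) ("", "")
    fmt.1 ++ PySem.Int.toStr (counts.getD (best - 4) 0) ++ fmt.2
  else
    "Mixed medical entities (" ++ PySem.Int.toStr (entity_names.length : Int) ++ " entities)"

-- ===== PRECONDITION & SPEC =====
def Spec_generate_community_theme (entity_names : List String) (entities : List (String × List (String × String))) (out : String) : Prop := out = generate_community_theme_alt entity_names entities
instance (entity_names : List String) (entities : List (String × List (String × String))) (out : String) : Decidable (Spec_generate_community_theme entity_names entities out) := by unfold Spec_generate_community_theme; infer_instance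

-- ===== CLAIM (what is proved, stated in full; the proofs are below) =====
def Claim_equal_generate_community_theme : Prop := ∀ (entity_names : List String) (entities : List (String × List (String × String))), Dom_generate_community_theme entity_names entities → Spec_generate_community_theme entity_names entities (generate_community_theme entity_names entities)

-- ===== LEMMAS AND PROOFS =====

-- A's count dict read back: base count plus number of names of that type
theorem pvCounts_getD (entities : List (String × List (String × String)))
    (names : List String) (d : PySem.Dict String Int) (t : String) :
    ((names.foldl (fun d n =>
      let entity_type := pvTypeOf entities n
      d.insert entity_type (d.getD entity_type 0 + 1)) d).getD t 0)
    = d.getD t 0 + ((names.filter (fun n => pvTypeOf entities n = t)).length : Int) := by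
  induction names generalizing d with
  | nil => simp
  | cons a l ih =>
    simp only [List.foldl_cons, ih, List.filter_cons]
    by_cases h : pvTypeOf entities a = t
    · simp only [h, PySem.Dict.getD_insert, decide_true, if_true, List.length_cons]
      push_cast; ring
    · simp [PySem.Dict.getD_insert, Ne.symm h, h]

-- A's conditions-filter predicate agrees with the defaulted type accessor
theorem pvPred_eq_dict (d : PySem.Dict String String) :
    (d.get? "type" == some "CONDITION") = decide (d.getD "type" "UNKNOWN" = "CONDITION") := by
  rw [PySem.Dict.getD_eq_get?_getD]
  cases h : d.get? "type" with
  | none => rfl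
  | some v => rfl

theorem pvPred_eq (entities : List (String × List (String × String))) (n : String) :
    ((PySem.Dict.mk ((PySem.Dict.mk entities).getD n [])).get? "type" == some "CONDITION")
    = decide (pvTypeOf entities n = "CONDITION") := by
  unfold pvTypeOf
  exact pvPred_eq_dict _

-- the three keyword tests, as written in A's cascade
def pvC0 (n : String) : Bool := PySem.Str.isIn "heart" n || PySem.Str.isIn "cardiac" n || PySem.Str.isIn "aortic" n
def pvC1 (n : String) : Bool := PySem.Str.isIn "liver" n || PySem.Str.isIn "hepatic" n || PySem.Str.isIn "cirrhosis" n
def pvC2 (n : String) : Bool := PySem.Str.isIn "hip" n || PySem.Str.isIn "knee" n || PySem.Str.isIn "bone" n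
def pvC3 (n : String) : Bool := PySem.Str.isIn "blood" n || PySem.Str.isIn "anemia" n || PySem.Str.isIn "hemoglobin" n

-- closed ite form of B's rank of one entity
theorem pvRank_CONDITION (n : String) : pvRank n "CONDITION" = pvKwScan n pvKeywords 0 := rfl
theorem pvRank_MEDICATION (n : String) : pvRank n "MEDICATION" = 5 := rfl
theorem pvRank_ANATOMY (n : String) : pvRank n "ANATOMY" = 6 := rfl
theorem pvRank_LAB_VALUE (n : String) : pvRank n "LAB_VALUE" = 7 := rfl
theorem pvRank_PROCEDURE (n : String) : pvRank n "PROCEDURE" = 8 := rfl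

theorem pvRank_other (n t : String) (h1 : t ≠ "CONDITION") (h2 : t ≠ "MEDICATION")
    (h3 : t ≠ "ANATOMY") (h4 : t ≠ "LAB_VALUE") (h5 : t ≠ "PROCEDURE") :
    pvRank n t = 9 := by
  unfold pvRank
  rw [PySem.Dict.getD_eq_get?_getD]
  simp [PySem.Dict.get?_mk_cons, PySem.Dict.get?,
    Ne.symm h1, Ne.symm h2, Ne.symm h3, Ne.symm h4, Ne.symm h5]

theorem pvKwScan_eq (n : String) :
    pvKwScan n pvKeywords 0 =
      (if pvC0 n then 0 else if pvC1 n then 1 else if pvC2 n then 2 else if pvC3 n then 3 else 4) := by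
  simp only [pvKeywords, pvKwScan, pvC0, pvC1, pvC2, pvC3, List.any_cons, List.any_nil,
    Bool.or_false, Bool.or_assoc]

theorem pvRank_eq (es : List (String × List (String × String))) (n : String) :
    pvRank n (pvTypeOf es n) =
      (if pvTypeOf es n = "CONDITION" then
        (if pvC0 n then 0 else if pvC1 n then 1 else if pvC2 n then 2 else if pvC3 n then 3 else 4)
      else if pvTypeOf es n = "MEDICATION" then 5
      else if pvTypeOf es n = "ANATOMY" then 6
      else if pvTypeOf es n = "LAB_VALUE" then 7
      else if pvTypeOf es n = "PROCEDURE" then 8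
      else 9) := by
  by_cases h1 : pvTypeOf es n = "CONDITION" <;>
  by_cases h2 : pvTypeOf es n = "MEDICATION" <;>
  by_cases h3 : pvTypeOf es n = "ANATOMY" <;>
  by_cases h4 : pvTypeOf es n = "LAB_VALUE" <;>
  by_cases h5 : pvTypeOf es n = "PROCEDURE" <;>
    simp_all [pvRank_CONDITION, pvRank_MEDICATION, pvRank_ANATOMY, pvRank_LAB_VALUE,
      pvRank_PROCEDURE, pvRank_other, pvKwScan_eq]

-- first component of B's fold: running minimum of the ranks
theorem pvFold_fst (es : List (String × List (String × String))) (l : List String)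
    (b : Nat) (cs : List Int) :
    (l.foldl (pvStep es) (b, cs)).1
    = l.foldl (fun a n => if pvRank n (pvTypeOf es n) < a then pvRank n (pvTypeOf es n) else a) b := by
  induction l generalizing b cs with
  | nil => rfl
  | cons a l ih => simp only [List.foldl_cons, pvStep, ih]

-- characterisation of the running minimum
theorem pvBest_le (es : List (String × List (String × String))) (l : List String) (k : Nat) :
    ∀ b, (l.foldl (fun a n => if pvRank n (pvTypeOf es n) < a then pvRank n (pvTypeOf es n) else a) b ≤ k)
      ↔ (b ≤ k ∨ ∃ n ∈ l, pvRank n (pvTypeOf es n) ≤ k) := by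
  induction l with
  | nil => simp
  | cons a l ih =>
    intro b
    rw [List.foldl_cons, ih]
    have h : ((if pvRank a (pvTypeOf es a) < b then pvRank a (pvTypeOf es a) else b) ≤ k)
        ↔ (pvRank a (pvTypeOf es a) ≤ k ∨ b ≤ k) := by split_ifs <;> omega
    rw [h]
    simp only [List.mem_cons, exists_eq_or_imp]
    tauto

-- the keyword scan never exceeds the plain-condition rank 4
theorem pvKwScan_le (n : String) : pvKwScan n pvKeywords 0 ≤ 4 := by
  rw [pvKwScan_eq]; split_ifs <;> omega

-- second component of B's fold: the five per-type tallies
theorem pvFold_snd (es : List (String × List (String × String))) (l : List String) :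
    ∀ (b : Nat) (c0 c1 c2 c3 c4 : Int),
    (l.foldl (pvStep es) (b, [c0, c1, c2, c3, c4])).2
    = [c0 + ((l.filter (fun n => pvTypeOf es n = "CONDITION")).length : Int),
       c1 + ((l.filter (fun n => pvTypeOf es n = "MEDICATION")).length : Int),
       c2 + ((l.filter (fun n => pvTypeOf es n = "ANATOMY")).length : Int),
       c3 + ((l.filter (fun n => pvTypeOf es n = "LAB_VALUE")).length : Int),
       c4 + ((l.filter (fun n => pvTypeOf es n = "PROCEDURE")).length : Int)] := by
  induction l with
  | nil => simp
  | cons a l ih =>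
    intro b c0 c1 c2 c3 c4
    rw [List.foldl_cons]
    by_cases h1 : pvTypeOf es a = "CONDITION"
    · have hr : pvRank a (pvTypeOf es a) ≤ 4 := by rw [h1, pvRank_CONDITION]; exact pvKwScan_le a
      simp only [pvStep, if_pos hr]
      simp [ih, List.filter_cons, h1]
      omega
    · by_cases h2 : pvTypeOf es a = "MEDICATION"
      · have hr : pvRank a (pvTypeOf es a) = 5 := by rw [h2, pvRank_MEDICATION]
        simp only [pvStep, hr]
        simp [ih, List.filter_cons, h2]
        omega
      · by_cases h3 : pvTypeOf es a = "ANATOMY"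
        · have hr : pvRank a (pvTypeOf es a) = 6 := by rw [h3, pvRank_ANATOMY]
          simp only [pvStep, hr]
          simp [ih, List.filter_cons, h3]
          omega
        · by_cases h4 : pvTypeOf es a = "LAB_VALUE"
          · have hr : pvRank a (pvTypeOf es a) = 7 := by rw [h4, pvRank_LAB_VALUE]
            simp only [pvStep, hr]
            simp [ih, List.filter_cons, h4]
            omega
          · by_cases h5 : pvTypeOf es a = "PROCEDURE"
            · have hr : pvRank a (pvTypeOf es a) = 8 := by rw [h5, pvRank_PROCEDURE]
              simp only [pvStep, hr]
              simp [ih, List.filter_cons, h5]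
              omega
            · have hr : pvRank a (pvTypeOf es a) = 9 := pvRank_other a _ h1 h2 h3 h4 h5
              simp only [pvStep, hr]
              simp [ih, List.filter_cons, h1, h2, h3, h4, h5]

theorem pvRank_le0 (es : List (String × List (String × String))) (n : String) :
    pvRank n (pvTypeOf es n) ≤ 0 ↔ (pvTypeOf es n = "CONDITION" ∧ pvC0 n = true) := by
  rw [pvRank_eq]; split_ifs <;> simp_all
theorem pvRank_le1 (es : List (String × List (String × String))) (n : String) :
    pvRank n (pvTypeOf es n) ≤ 1 ↔ (pvTypeOf es n = "CONDITION" ∧ (pvC0 n = true ∨ pvC1 n = true)) := by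
  rw [pvRank_eq]; split_ifs <;> simp_all
theorem pvRank_le2 (es : List (String × List (String × String))) (n : String) :
    pvRank n (pvTypeOf es n) ≤ 2 ↔ (pvTypeOf es n = "CONDITION" ∧ (pvC0 n = true ∨ pvC1 n = true ∨ pvC2 n = true)) := by
  rw [pvRank_eq]; split_ifs <;> simp_all
theorem pvRank_le3 (es : List (String × List (String × String))) (n : String) :
    pvRank n (pvTypeOf es n) ≤ 3 ↔ (pvTypeOf es n = "CONDITION" ∧ (pvC0 n = true ∨ pvC1 n = true ∨ pvC2 n = true ∨ pvC3 n = true)) := by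
  rw [pvRank_eq]; split_ifs <;> simp_all
theorem pvRank_le4 (es : List (String × List (String × String))) (n : String) :
    pvRank n (pvTypeOf es n) ≤ 4 ↔ pvTypeOf es n = "CONDITION" := by
  rw [pvRank_eq]; split_ifs <;> simp_all
theorem pvRank_le5 (es : List (String × List (String × String))) (n : String) :
    pvRank n (pvTypeOf es n) ≤ 5 ↔ (pvTypeOf es n = "CONDITION" ∨ pvTypeOf es n = "MEDICATION") := by
  rw [pvRank_eq]; split_ifs <;> simp_all
theorem pvRank_le6 (es : List (String × List (String × String))) (n : String) :
    pvRank n (pvTypeOf es n) ≤ 6 ↔ (pvTypeOf es n = "CONDITION" ∨ pvTypeOf es n = "MEDICATION" ∨ pvTypeOf es n = "ANATOMY") := by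
  rw [pvRank_eq]; split_ifs <;> simp_all
theorem pvRank_le7 (es : List (String × List (String × String))) (n : String) :
    pvRank n (pvTypeOf es n) ≤ 7 ↔ (pvTypeOf es n = "CONDITION" ∨ pvTypeOf es n = "MEDICATION" ∨ pvTypeOf es n = "ANATOMY" ∨ pvTypeOf es n = "LAB_VALUE") := by
  rw [pvRank_eq]; split_ifs <;> simp_all
theorem pvRank_le8 (es : List (String × List (String × String))) (n : String) :
    pvRank n (pvTypeOf es n) ≤ 8 ↔ (pvTypeOf es n = "CONDITION" ∨ pvTypeOf es n = "MEDICATION" ∨ pvTypeOf es n = "ANATOMY" ∨ pvTypeOf es n = "LAB_VALUE" ∨ pvTypeOf es n = "PROCEDURE") := by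
  rw [pvRank_eq]; split_ifs <;> simp_all

theorem pvCnt_pos (es : List (String × List (String × String))) (en : List String) (t : String) :
    ((0:Int) < ((en.filter (fun n => decide (pvTypeOf es n = t))).length : Int)) ↔ ∃ n ∈ en, pvTypeOf es n = t := by
  rw [Int.natCast_pos, List.length_pos_iff_exists_mem]
  simp [List.mem_filter]

theorem pvAny_cond (es : List (String × List (String × String))) (en : List String) (q : String → Bool) :
    ((en.filter (fun n => decide (pvTypeOf es n = "CONDITION"))).any q = true) ↔ ∃ n ∈ en, pvTypeOf es n = "CONDITION" ∧ q n = true := by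
  simp [List.any_eq_true, List.mem_filter, and_assoc]

-- ===== VERDICT (by name: the statement is the Claim_ definition above) =====
theorem generate_community_theme_spec : Claim_equal_generate_community_theme := by
  intro en es _
  unfold Spec_generate_community_theme generate_community_theme generate_community_theme_alt
  simp only [pvCounts_getD, PySem.Dict.getD_empty, zero_add,
    List.filter_congr (fun n _ => pvPred_eq es n), pvFold_fst, pvFold_snd]
  rw [show (fun name => PySem.Str.isIn "heart" name || PySem.Str.isIn "cardiac" name || PySem.Str.isIn "aortic" name) = pvC0 from rfl,
      show (fun name => PySem.Str.isIn "liver" name || PySem.Str.isIn "hepatic" name || PySem.Str.isIn "cirrhosis" name) = pvC1 from rfl,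
      show (fun name => PySem.Str.isIn "hip" name || PySem.Str.isIn "knee" name || PySem.Str.isIn "bone" name) = pvC2 from rfl,
      show (fun name => PySem.Str.isIn "blood" name || PySem.Str.isIn "anemia" name || PySem.Str.isIn "hemoglobin" name) = pvC3 from rfl]
  set best := List.foldl (fun a n => if pvRank n (pvTypeOf es n) < a then pvRank n (pvTypeOf es n) else a) 9 en with hbdef
  have hle : ∀ k, best ≤ k ↔ (9 ≤ k ∨ ∃ n ∈ en, pvRank n (pvTypeOf es n) ≤ k) :=
    fun k => pvBest_le es en k 9
  by_cases hC : ∃ n ∈ en, pvTypeOf es n = "CONDITION"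
  · rw [if_pos ((pvCnt_pos es en "CONDITION").mpr hC)]
    have hb4 : best ≤ 4 := (hle 4).mpr (Or.inr (by
      obtain ⟨n, hn, ht⟩ := hC; exact ⟨n, hn, (pvRank_le4 es n).mpr ht⟩))
    by_cases h0 : ∃ n ∈ en, pvTypeOf es n = "CONDITION" ∧ pvC0 n = true
    · have hbe : best = 0 := Nat.le_zero.mp ((hle 0).mpr (Or.inr (by
        obtain ⟨n, hn, ht, hq⟩ := h0; exact ⟨n, hn, (pvRank_le0 es n).mpr ⟨ht, hq⟩⟩)))
      rw [if_pos ((pvAny_cond es en pvC0).mpr h0), hbe]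
      simp
    · have hnb0 : ¬ best ≤ 0 := by
        intro h
        rcases (hle 0).mp h with h9 | ⟨n, hn, hr⟩
        · omega
        · exact h0 ⟨n, hn, (pvRank_le0 es n).mp hr⟩
      rw [if_neg (fun hq => h0 ((pvAny_cond es en pvC0).mp hq))]
      by_cases h1 : ∃ n ∈ en, pvTypeOf es n = "CONDITION" ∧ pvC1 n = true
      · have hbe : best = 1 := by
          have : best ≤ 1 := (hle 1).mpr (Or.inr (by
            obtain ⟨n, hn, ht, hq⟩ := h1; exact ⟨n, hn, (pvRank_le1 es n).mpr ⟨ht, Or.inr hq⟩⟩))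
          omega
        rw [if_pos ((pvAny_cond es en pvC1).mpr h1), hbe]
        simp
      · have hnb1 : ¬ best ≤ 1 := by
          intro h
          rcases (hle 1).mp h with h9 | ⟨n, hn, hr⟩
          · omega
          · rcases (pvRank_le1 es n).mp hr with ⟨ht, hc0 | hc1⟩
            · exact h0 ⟨n, hn, ht, hc0⟩
            · exact h1 ⟨n, hn, ht, hc1⟩
        rw [if_neg (fun hq => h1 ((pvAny_cond es en pvC1).mp hq))]
        by_cases h2 : ∃ n ∈ en, pvTypeOf es n = "CONDITION" ∧ pvC2 n = true
        · have hbe : best = 2 := by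
            have : best ≤ 2 := (hle 2).mpr (Or.inr (by
              obtain ⟨n, hn, ht, hq⟩ := h2; exact ⟨n, hn, (pvRank_le2 es n).mpr ⟨ht, Or.inr (Or.inr hq)⟩⟩))
            omega
          rw [if_pos ((pvAny_cond es en pvC2).mpr h2), hbe]
          simp
        · have hnb2 : ¬ best ≤ 2 := by
            intro h
            rcases (hle 2).mp h with h9 | ⟨n, hn, hr⟩
            · omega
            · rcases (pvRank_le2 es n).mp hr with ⟨ht, hc0 | hc1 | hc2⟩
              · exact h0 ⟨n, hn, ht, hc0⟩
              · exact h1 ⟨n, hn, ht, hc1⟩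
              · exact h2 ⟨n, hn, ht, hc2⟩
          rw [if_neg (fun hq => h2 ((pvAny_cond es en pvC2).mp hq))]
          by_cases h3 : ∃ n ∈ en, pvTypeOf es n = "CONDITION" ∧ pvC3 n = true
          · have hbe : best = 3 := by
              have : best ≤ 3 := (hle 3).mpr (Or.inr (by
                obtain ⟨n, hn, ht, hq⟩ := h3
                exact ⟨n, hn, (pvRank_le3 es n).mpr ⟨ht, Or.inr (Or.inr (Or.inr hq))⟩⟩))
              omega
            rw [if_pos ((pvAny_cond es en pvC3).mpr h3), hbe]
            simp
          · have hnb3 : ¬ best ≤ 3 := by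
              intro h
              rcases (hle 3).mp h with h9 | ⟨n, hn, hr⟩
              · omega
              · rcases (pvRank_le3 es n).mp hr with ⟨ht, hc0 | hc1 | hc2 | hc3⟩
                · exact h0 ⟨n, hn, ht, hc0⟩
                · exact h1 ⟨n, hn, ht, hc1⟩
                · exact h2 ⟨n, hn, ht, hc2⟩
                · exact h3 ⟨n, hn, ht, hc3⟩
            have hbe : best = 4 := by omega
            rw [if_neg (fun hq => h3 ((pvAny_cond es en pvC3).mp hq)), hbe]
            simp
  · rw [if_neg (fun hq => hC ((pvCnt_pos es en "CONDITION").mp hq))]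
    have hnb4 : ¬ best ≤ 4 := by
      intro h
      rcases (hle 4).mp h with h9 | ⟨n, hn, hr⟩
      · omega
      · exact hC ⟨n, hn, (pvRank_le4 es n).mp hr⟩
    by_cases hM : ∃ n ∈ en, pvTypeOf es n = "MEDICATION"
    · have hbe : best = 5 := by
        have : best ≤ 5 := (hle 5).mpr (Or.inr (by
          obtain ⟨n, hn, ht⟩ := hM; exact ⟨n, hn, (pvRank_le5 es n).mpr (Or.inr ht)⟩))
        omega
      rw [if_pos ((pvCnt_pos es en "MEDICATION").mpr hM), hbe]
      simp
    · have hnb5 : ¬ best ≤ 5 := by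
        intro h
        rcases (hle 5).mp h with h9 | ⟨n, hn, hr⟩
        · omega
        · rcases (pvRank_le5 es n).mp hr with ht | ht
          · exact hC ⟨n, hn, ht⟩
          · exact hM ⟨n, hn, ht⟩
      rw [if_neg (fun hq => hM ((pvCnt_pos es en "MEDICATION").mp hq))]
      by_cases hA : ∃ n ∈ en, pvTypeOf es n = "ANATOMY"
      · have hbe : best = 6 := by
          have : best ≤ 6 := (hle 6).mpr (Or.inr (by
            obtain ⟨n, hn, ht⟩ := hA; exact ⟨n, hn, (pvRank_le6 es n).mpr (Or.inr (Or.inr ht))⟩))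
          omega
        rw [if_pos ((pvCnt_pos es en "ANATOMY").mpr hA), hbe]
        simp
      · have hnb6 : ¬ best ≤ 6 := by
          intro h
          rcases (hle 6).mp h with h9 | ⟨n, hn, hr⟩
          · omega
          · rcases (pvRank_le6 es n).mp hr with ht | ht | ht
            · exact hC ⟨n, hn, ht⟩
            · exact hM ⟨n, hn, ht⟩
            · exact hA ⟨n, hn, ht⟩
        rw [if_neg (fun hq => hA ((pvCnt_pos es en "ANATOMY").mp hq))]
        by_cases hL : ∃ n ∈ en, pvTypeOf es n = "LAB_VALUE"
        · have hbe : best = 7 := by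
            have : best ≤ 7 := (hle 7).mpr (Or.inr (by
              obtain ⟨n, hn, ht⟩ := hL
              exact ⟨n, hn, (pvRank_le7 es n).mpr (Or.inr (Or.inr (Or.inr ht)))⟩))
            omega
          rw [if_pos ((pvCnt_pos es en "LAB_VALUE").mpr hL), hbe]
          simp
        · have hnb7 : ¬ best ≤ 7 := by
            intro h
            rcases (hle 7).mp h with h9 | ⟨n, hn, hr⟩
            · omega
            · rcases (pvRank_le7 es n).mp hr with ht | ht | ht | ht
              · exact hC ⟨n, hn, ht⟩
              · exact hM ⟨n, hn, ht⟩
              · exact hA ⟨n, hn, ht⟩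
              · exact hL ⟨n, hn, ht⟩
          rw [if_neg (fun hq => hL ((pvCnt_pos es en "LAB_VALUE").mp hq))]
          by_cases hP : ∃ n ∈ en, pvTypeOf es n = "PROCEDURE"
          · have hbe : best = 8 := by
              have : best ≤ 8 := (hle 8).mpr (Or.inr (by
                obtain ⟨n, hn, ht⟩ := hP
                exact ⟨n, hn, (pvRank_le8 es n).mpr (Or.inr (Or.inr (Or.inr (Or.inr ht))))⟩))
              omega
            rw [if_pos ((pvCnt_pos es en "PROCEDURE").mpr hP), hbe]
            simp
          · have hnb8 : ¬ best ≤ 8 := by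
              intro h
              rcases (hle 8).mp h with h9 | ⟨n, hn, hr⟩
              · omega
              · rcases (pvRank_le8 es n).mp hr with ht | ht | ht | ht | ht
                · exact hC ⟨n, hn, ht⟩
                · exact hM ⟨n, hn, ht⟩
                · exact hA ⟨n, hn, ht⟩
                · exact hL ⟨n, hn, ht⟩
                · exact hP ⟨n, hn, ht⟩
            rw [if_neg (fun hq => hP ((pvCnt_pos es en "PROCEDURE").mp hq)),
                if_neg (show ¬ best < 4 by omega), if_neg (show ¬ best = 4 by omega),
                if_neg hnb8]
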